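-- pv_equiv track=rewrite | github.com/miliar/Code_Jam_Webscraper | solutions_python/Problem_138/1417.py | chooseKen
-- ===== SOURCE A (Python) =====
-- def chooseKen(naomiChosen, KenBlocks):
-- 	largerBlocks = []
-- 	for b in KenBlocks:
-- 		if b > naomiChosen:
-- 			largerBlocks.append(b)
--
-- 	if len(largerBlocks):
-- 		return min(largerBlocks)
--
-- 	else :
-- 		return min(KenBlocks)
-- ===== SOURCE B (Python) =====
-- def chooseKen(naomiChosen, KenBlocks):
--     # one pass: track overall minimum and smallest block strictly larger than naomiChosen
--     overall = None
--     best_larger = None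
--     for b in KenBlocks:
--         if overall is None or b < overall:
--             overall = b
--         if b > naomiChosen and (best_larger is None or b < best_larger):
--             best_larger = b
--     if overall is None:
--         raise ValueError("chooseKen: empty KenBlocks")
--     return best_larger if best_larger is not None else overall
-- ===== Notes on version B (the rewrite author's own statement) =====
-- stated objective: alternative
-- what changed: replaces A's build-a-filtered-list-then-min structure by a single fold over KenBlocks maintaining two accumulators (overall minimum and smallest element strictly greater than naomiChosen), with no intermediate list
import Mathlib
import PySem

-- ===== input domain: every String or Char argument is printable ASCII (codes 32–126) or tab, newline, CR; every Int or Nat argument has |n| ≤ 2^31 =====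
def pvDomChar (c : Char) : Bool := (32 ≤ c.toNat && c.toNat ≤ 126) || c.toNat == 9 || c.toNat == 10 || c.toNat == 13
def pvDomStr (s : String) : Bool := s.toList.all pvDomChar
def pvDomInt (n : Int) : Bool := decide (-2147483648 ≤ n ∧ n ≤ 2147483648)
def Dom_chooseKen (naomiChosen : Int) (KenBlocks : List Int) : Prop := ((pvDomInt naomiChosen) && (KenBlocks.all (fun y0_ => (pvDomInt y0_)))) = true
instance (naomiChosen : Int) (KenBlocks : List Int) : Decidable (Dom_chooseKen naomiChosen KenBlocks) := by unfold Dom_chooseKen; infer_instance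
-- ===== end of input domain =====

-- B replaces A's filter-then-two-mins structure by one fold with two accumulators (alternative decomposition, same cost).

-- ===== PORT A =====
-- literal port of A: build largerBlocks with a loop, then min(largerBlocks) or min(KenBlocks)
-- (min [] raises ValueError in Python → excluded by Pre_; .getD 0 is only a totalization default there)
def chooseKen (naomiChosen : Int) (KenBlocks : List Int) : Int :=
  let largerBlocks := KenBlocks.foldl (fun acc b => if b > naomiChosen then acc ++ [b] else acc) []
  if largerBlocks.length ≠ 0 then
    (PySem.List.min? largerBlocks (fun x => x)).getD 0
  else
    (PySem.List.min? KenBlocks (fun x => x)).getD 0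

-- ===== PORT B =====
-- one pass, two Option accumulators (overall minimum, smallest element > naomiChosen)
def chooseKenStep (n : Int) (st : Option Int × Option Int) (b : Int) : Option Int × Option Int :=
  let overall := match st.1 with
    | none => some b
    | some m => if b < m then some b else some m
  let best := if b > n then
      match st.2 with
      | none => some b
      | some m => if b < m then some b else some m
    else st.2
  (overall, best)

-- on empty KenBlocks Source B raises ValueError (excluded by Pre_); 0 is only a totalization default
def chooseKen_alt (naomiChosen : Int) (KenBlocks : List Int) : Int :=
  let st := KenBlocks.foldl (chooseKenStep naomiChosen) (none, none)
  match st.1 with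
  | none => 0
  | some overall => st.2.getD overall

-- ===== PRECONDITION & SPEC =====
-- Pre_ excludes only the empty list, on which Python's min([]) raises ValueError in both A and B
def Pre_chooseKen (naomiChosen : Int) (KenBlocks : List Int) : Prop := KenBlocks ≠ []
instance (naomiChosen : Int) (KenBlocks : List Int) : Decidable (Pre_chooseKen naomiChosen KenBlocks) := by unfold Pre_chooseKen; infer_instance
def pvWitness_chooseKen : Int × List Int := (3, [1, 5, 2, 7])

def Spec_chooseKen (naomiChosen : Int) (KenBlocks : List Int) (out : Int) : Prop := out = chooseKen_alt naomiChosen KenBlocks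
instance (naomiChosen : Int) (KenBlocks : List Int) (out : Int) : Decidable (Spec_chooseKen naomiChosen KenBlocks out) := by unfold Spec_chooseKen; infer_instance

-- ===== CLAIM (what is proved, stated in full; the proofs are below) =====
def Claim_equal_chooseKen : Prop := ∀ (naomiChosen : Int) (KenBlocks : List Int), Dom_chooseKen naomiChosen KenBlocks → Pre_chooseKen naomiChosen KenBlocks → Spec_chooseKen naomiChosen KenBlocks (chooseKen naomiChosen KenBlocks)

-- ===== LEMMAS AND PROOFS =====

-- combine two optional minima
def oMin : Option Int → Option Int → Option Int
  | a, none => a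
  | none, b => b
  | some x, some y => some (min x y)

theorem oMin_none_left (b : Option Int) : oMin none b = b := by cases b <;> rfl

theorem oMin_assoc (a b c : Option Int) : oMin (oMin a b) c = oMin a (oMin b c) := by
  cases a <;> cases b <;> cases c <;> simp [oMin, min_assoc]

theorem step_overall (m b : Int) :
    (if b < m then some b else some m) = oMin (some m) (some b) := by
  by_cases h : b < m <;> simp [oMin, h] <;> omega

-- min? with identity key as oMin-fold
theorem min?_cons_oMin (x : Int) (t : List Int) :
    PySem.List.min? (x :: t) (fun y => y) = oMin (some x) (PySem.List.min? t (fun y => y)) := by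
  cases t with
  | nil => simp [PySem.List.min?, oMin]
  | cons y s =>
    simp only [PySem.List.min?_id_cons, oMin, List.foldl_cons]
    exact congrArg some (List.foldl_assoc (op := min) (l := s) (a₁ := x) (a₂ := y))

-- the loop invariant of B
theorem fold_invariant (n : Int) (ks : List Int) (ov best : Option Int) :
    ks.foldl (chooseKenStep n) (ov, best) =
      (oMin ov (PySem.List.min? ks (fun y => y)),
       oMin best (PySem.List.min? (ks.filter (fun b => decide (b > n))) (fun y => y))) := by
  induction ks generalizing ov best with
  | nil => simp [PySem.List.min?, oMin]
  | cons b t ih =>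
    rw [List.foldl_cons, ih]
    rw [min?_cons_oMin]
    by_cases h : b > n
    · have : (b :: t).filter (fun b => decide (b > n)) = b :: t.filter (fun b => decide (b > n)) := by
        simp [List.filter, h]
      rw [this, min?_cons_oMin]
      cases ov <;> cases best <;>
        simp [chooseKenStep, h, oMin_none_left, step_overall, ← oMin_assoc]
    · have : (b :: t).filter (fun b => decide (b > n)) = t.filter (fun b => decide (b > n)) := by
        simp [List.filter, h]
      rw [this]
      cases ov <;>
        simp [chooseKenStep, h, oMin_none_left, step_overall, ← oMin_assoc]

-- A's list-building loop is filter
theorem fold_filter (n : Int) (ks : List Int) (acc : List Int) :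
    ks.foldl (fun acc b => if b > n then acc ++ [b] else acc) acc
      = acc ++ ks.filter (fun b => decide (b > n)) := by
  induction ks generalizing acc with
  | nil => simp
  | cons b t ih =>
    by_cases h : b > n <;> simp [List.foldl_cons, h, ih]

-- ===== VERDICT (by name: the statement is the Claim_ definition above) =====
theorem chooseKen_spec : Claim_equal_chooseKen := by
  intro n ks _ hne
  unfold Spec_chooseKen chooseKen chooseKen_alt
  rw [fold_filter, fold_invariant]
  simp only [List.nil_append, oMin_none_left]
  cases hks : PySem.List.min? ks (fun y => y) with
  | none => exact absurd ((PySem.List.min?_eq_none_iff ks _).mp hks) hne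
  | some mAll =>
    cases hf : PySem.List.min? (ks.filter (fun b => decide (b > n))) (fun y => y) with
    | none =>
      have : ks.filter (fun b => decide (b > n)) = [] := (PySem.List.min?_eq_none_iff _ _).mp hf
      simp [this]
    | some mL =>
      have : ks.filter (fun b => decide (b > n)) ≠ [] := by
        intro h; rw [h] at hf; simp [PySem.List.min?] at hf
      simp [this, List.length_eq_zero_iff]
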